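-- pv_equiv track=rewrite | github.com/Pixel-Sensei/Block10 | Aufgabe3.py | loesche_ungerade
-- ===== SOURCE A (Python) =====
-- def loesche_ungerade(p):
--     i = 0
--     while i < len(p):
--         if p[i] % 2 == 1:  # Prüft, ob die Zahl ungerade ist
--             p.remove(p[i])  # Entfernt die ungerade Zahl
--         else:
--             i += 1  # Erhöht den Index, wenn die Zahl gerade ist
--     return p  # Gibt die modifizierte Liste zurück
-- ===== SOURCE B (Python) =====
-- def loesche_ungerade(p):
--     # single-pass in-place two-pointer compaction of the same list object
--     w = 0
--     for x in p:
--         if x % 2 != 1: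
--             p[w] = x
--             w += 1
--     del p[w:]
--     return p
-- ===== Notes on version B (the rewrite author's own statement) =====
-- stated objective: faster
-- what changed: Replaces the while-loop that repeatedly calls list.remove (a linear scan-and-shift per odd element) with a single in-place two-pointer compaction pass that writes kept elements forward and truncates once.
import Mathlib
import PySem

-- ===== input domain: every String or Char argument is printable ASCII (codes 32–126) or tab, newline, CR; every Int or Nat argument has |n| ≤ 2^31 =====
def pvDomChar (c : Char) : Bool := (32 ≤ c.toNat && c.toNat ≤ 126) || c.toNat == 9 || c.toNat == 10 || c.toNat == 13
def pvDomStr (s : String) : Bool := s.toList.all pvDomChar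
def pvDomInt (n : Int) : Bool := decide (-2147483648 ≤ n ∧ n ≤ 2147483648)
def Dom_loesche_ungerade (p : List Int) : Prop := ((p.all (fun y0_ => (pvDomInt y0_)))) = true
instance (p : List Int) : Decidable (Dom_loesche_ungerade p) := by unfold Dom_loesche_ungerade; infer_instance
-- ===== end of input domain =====

-- B replaces A's quadratic remove-per-odd-element loop with one in-place compaction pass (faster);
-- both mutate the caller's list in Python, the equivalence proved here is about the returned value.


-- ===== PORT A =====
-- while i < len(p): if p[i] % 2 == 1: p.remove(p[i]) else: i += 1
-- i < p.length holds at the p[i] access, so the in-bounds getElem is exact;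
-- p.remove(x) with x ∈ p always succeeds, so '(remove? p x).getD p' is exact there.
def loescheLoop (p : List Int) (i : Nat) : List Int :=
  if h : i < p.length then
    if PySem.Int.mod p[i] 2 = 1 then
      loescheLoop ((PySem.List.remove? p p[i]).getD p) i
    else
      loescheLoop p (i + 1)
  else p
termination_by p.length - i
decreasing_by
  · have hx : p[i] ∈ p := List.getElem_mem h
    rw [PySem.List.remove?_eq_some_erase p p[i] hx]
    have := List.length_erase_of_mem hx
    simp only [Option.getD_some]
    omega
  · omega

def loesche_ungerade (p : List Int) : List Int := loescheLoop p 0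

-- ===== PORT B =====
-- w = 0; for x in p: if x % 2 != 1: p[w] = x; w += 1
-- del p[w:]; return p        -- the accumulator is the written prefix p[0:w]
def loesche_ungerade_alt (p : List Int) : List Int :=
  p.foldl (fun acc x => if PySem.Int.mod x 2 ≠ 1 then acc ++ [x] else acc) []

-- ===== PRECONDITION & SPEC =====
def Spec_loesche_ungerade (p : List Int) (out : List Int) : Prop := out = loesche_ungerade_alt p
instance (p : List Int) (out : List Int) : Decidable (Spec_loesche_ungerade p out) := by unfold Spec_loesche_ungerade; infer_instance

-- ===== CLAIM (what is proved, stated in full; the proofs are below) =====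
def Claim_equal_loesche_ungerade : Prop := ∀ (p : List Int), Dom_loesche_ungerade p → Spec_loesche_ungerade p (loesche_ungerade p)

-- ===== LEMMAS AND PROOFS =====

lemma loescheLoop_eq (p : List Int) (i : Nat)
    (hpre : ∀ x ∈ p.take i, ¬ PySem.Int.mod x 2 = 1) :
    loescheLoop p i = p.take i ++ (p.drop i).filter (fun x => decide (¬ PySem.Int.mod x 2 = 1)) := by
  induction p, i using loescheLoop.induct with
  | case1 p i h hodd ih =>
    have hx : p[i] ∈ p := List.getElem_mem h
    have hsplit : p.take i ++ p[i] :: p.drop (i + 1) = p := by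
      rw [← List.drop_eq_getElem_cons h]; exact List.take_append_drop i p
    have hlen : (p.take i).length = i := by simp [List.length_take]; omega
    set x := p[i] with hxdef
    have hnot : x ∉ p.take i := fun hmem => hpre _ hmem hodd
    have herase : (PySem.List.remove? p x).getD p = p.take i ++ p.drop (i + 1) := by
      conv_lhs => rw [PySem.List.remove?_eq_some_erase p x hx, Option.getD_some, ← hsplit]
      rw [List.erase_append_right _ hnot, List.erase_cons_head]
    have h1 : (p.take i ++ p.drop (i + 1)).take i = p.take i := by
      exact List.take_left' hlen
    have h2 : (p.take i ++ p.drop (i + 1)).drop i = p.drop (i + 1) := by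
      exact List.drop_left' hlen
    rw [loescheLoop]
    simp only [h, dif_pos]
    rw [if_pos hodd, ih (by rw [herase, h1]; exact hpre), herase, h1, h2,
        List.drop_eq_getElem_cons h,
        List.filter_cons_of_neg (by simpa using hodd)]
  | case2 p i h hodd ih =>
    rw [loescheLoop]
    simp only [h, dif_pos]
    rw [if_neg hodd]
    rw [ih (by
      intro y hy
      rw [List.take_add_one] at hy
      simp only [List.mem_append] at hy
      rcases hy with hy | hy
      · exact hpre y hy
      · simp only [List.getElem?_eq_getElem h, Option.toList_some, List.mem_singleton] at hy
        subst hy; exact hodd)]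
    rw [List.drop_eq_getElem_cons h,
        List.filter_cons_of_pos (by simpa using hodd),
        List.take_add_one, List.getElem?_eq_getElem h]
    simp only [Option.toList_some, List.append_assoc, List.singleton_append]
  | case3 p i h =>
    rw [loescheLoop]
    simp only [h, dif_neg, not_false_iff]
    have : p.length ≤ i := by omega
    simp [List.take_of_length_le this, List.drop_of_length_le this]

lemma alt_eq_filter (p : List Int) :
    loesche_ungerade_alt p = p.filter (fun x => decide (¬ PySem.Int.mod x 2 = 1)) := by
  unfold loesche_ungerade_alt
  rw [PySem.List.foldl_append_ite_eq_filter]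
  simp

-- ===== VERDICT (by name: the statement is the Claim_ definition above) =====
theorem loesche_ungerade_spec : Claim_equal_loesche_ungerade := by
  intro p _
  unfold Spec_loesche_ungerade
  rw [alt_eq_filter]
  unfold loesche_ungerade
  rw [loescheLoop_eq p 0 (by simp)]
  simp
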